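-- pv_equiv track=rewrite | github.com/PanWolan/Tetris-python | main.py | tworzenie_siatki
-- ===== SOURCE A (Python) =====
-- def tworzenie_siatki(zajete_miejsca = {}):
--
--     siatka = [[(0, 0, 0) for x in range(10)] for x in range(20)] # tworzy 10 kwadratow w kazdym z 20 rzedow, jeden kwadrat to lista ktora przechowuje wartosc rgb koloru domyslne (0,0,0) jest czarne
--
--     for i in range(len(siatka)):
--         for j in range(len(siatka[i])):
--             if (i, j) in zajete_miejsca:
--                 temp = zajete_miejsca[(i, j)]
--                 siatka[i][j] = temp
--     return siatka
-- ===== SOURCE B (Python) =====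
-- def tworzenie_siatki(zajete_miejsca = {}):
--     # Single pass over the dict items instead of scanning all 200 cells with a membership test each.
--     siatka = [[(0, 0, 0) for x in range(10)] for x in range(20)]
--     for (i, j), kolor in zajete_miejsca.items():
--         if 0 <= i < 20 and 0 <= j < 10:
--             siatka[i][j] = kolor
--     return siatka
-- ===== Notes on version B (the rewrite author's own statement) =====
-- stated objective: simpler
-- what changed: B makes one pass over the dict's items, assigning each in-range (i,j) cell directly, instead of A's double loop over all 200 cells with a dict membership test and lookup per cell.
import Mathlib
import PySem

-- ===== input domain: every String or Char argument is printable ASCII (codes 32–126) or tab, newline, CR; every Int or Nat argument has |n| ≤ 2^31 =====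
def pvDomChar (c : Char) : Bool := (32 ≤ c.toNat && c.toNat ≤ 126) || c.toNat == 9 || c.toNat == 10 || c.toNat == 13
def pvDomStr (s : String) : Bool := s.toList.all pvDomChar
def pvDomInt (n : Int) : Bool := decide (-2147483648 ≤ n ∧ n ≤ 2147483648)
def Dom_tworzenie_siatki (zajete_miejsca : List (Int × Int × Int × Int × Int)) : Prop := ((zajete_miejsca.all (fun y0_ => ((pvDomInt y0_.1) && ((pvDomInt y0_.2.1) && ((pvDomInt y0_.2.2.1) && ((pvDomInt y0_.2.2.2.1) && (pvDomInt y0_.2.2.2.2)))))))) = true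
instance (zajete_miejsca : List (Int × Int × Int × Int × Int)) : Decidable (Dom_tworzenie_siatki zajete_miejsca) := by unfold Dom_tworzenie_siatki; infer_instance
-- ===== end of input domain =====

-- B replaces A's double loop over all 200 cells (with a dict membership test per cell) by one
-- pass over the dict's items assigning each in-range cell directly; equal return value on all inputs.

-- The Python parameter is a dict[(int,int),(int,int,int)], represented here as its flattened
-- item list (i, j, r, g, b); both ports rebuild the dict (Python dict semantics: duplicate keys
-- collapse, last value wins) with this shared decoding helper.
def pvDict (zajete_miejsca : List (Int × Int × Int × Int × Int)) :
    PySem.Dict (Int × Int) (Int × Int × Int) :=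
  PySem.Dict.ofList (zajete_miejsca.map (fun t => ((t.1, t.2.1), t.2.2)))

-- `siatka = [[(0,0,0) for x in range(10)] for x in range(20)]` (the identical first line of A and B)
def pvGrid0 : List (List (Int × Int × Int)) :=
  (List.range 20).map (fun _ => (List.range 10).map (fun _ => ((0:Int), (0:Int), (0:Int))))

-- ===== PORT A =====
def tworzenie_siatki (zajete_miejsca : List (Int × Int × Int × Int × Int)) :
    List (List (Int × Int × Int)) :=
  let zd := pvDict zajete_miejsca
  let siatka := pvGrid0
  (List.range siatka.length).foldl (fun s (i : Nat) =>
    (List.range ((s.getD i []).length)).foldl (fun s (j : Nat) =>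
      if zd.contains ((i : Int), (j : Int)) then
        s.modify i (fun row => row.set j (zd.getD ((i : Int), (j : Int)) (0, 0, 0)))
      else s) s) siatka

-- ===== PORT B =====
def tworzenie_siatki_alt (zajete_miejsca : List (Int × Int × Int × Int × Int)) :
    List (List (Int × Int × Int)) :=
  let zd := pvDict zajete_miejsca
  let siatka := pvGrid0
  zd.items.foldl (fun s p =>
    if 0 ≤ p.1.1 ∧ p.1.1 < 20 ∧ 0 ≤ p.1.2 ∧ p.1.2 < 10 then
      s.modify p.1.1.toNat (fun row => row.set p.1.2.toNat p.2)
    else s) siatka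

-- ===== PRECONDITION & SPEC =====
def Spec_tworzenie_siatki (zajete_miejsca : List (Int × Int × Int × Int × Int)) (out : List (List (Int × Int × Int))) : Prop := out = tworzenie_siatki_alt zajete_miejsca
instance (zajete_miejsca : List (Int × Int × Int × Int × Int)) (out : List (List (Int × Int × Int))) : Decidable (Spec_tworzenie_siatki zajete_miejsca out) := by unfold Spec_tworzenie_siatki; infer_instance

-- ===== CLAIM (what is proved, stated in full; the proofs are below) =====
def Claim_equal_tworzenie_siatki : Prop := ∀ (zajete_miejsca : List (Int × Int × Int × Int × Int)), Dom_tworzenie_siatki zajete_miejsca → Spec_tworzenie_siatki zajete_miejsca (tworzenie_siatki zajete_miejsca)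

-- ===== LEMMAS AND PROOFS =====

-- the canonical value both programs compute: cell (i,j) holds the dict value, default black
def pvTarget (zd : PySem.Dict (Int × Int) (Int × Int × Int)) : List (List (Int × Int × Int)) :=
  (List.range 20).map (fun (i : Nat) => (List.range 10).map (fun (j : Nat) =>
    zd.getD ((i : Int), (j : Int)) (0, 0, 0)))

def pvShape (s : List (List (Int × Int × Int))) : Prop :=
  s.length = 20 ∧ ∀ (i : Nat) (h : i < s.length), s[i].length = 10

def pvCell (s : List (List (Int × Int × Int))) (i j : Nat) : Int × Int × Int :=
  (s.getD i []).getD j (0, 0, 0)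

lemma pvShape_pvGrid0 : pvShape pvGrid0 := by
  constructor
  · simp only [pvGrid0, List.length_map, List.length_range]
  · intro i h
    simp only [pvGrid0, List.getElem_map, List.length_map, List.length_range]

lemma pvGrid0_length : pvGrid0.length = 20 := by
  simp only [pvGrid0, List.length_map, List.length_range]

lemma pvCell_pvGrid0 (i j : Nat) : pvCell pvGrid0 i j = (0, 0, 0) := by
  unfold pvCell
  rcases Nat.lt_or_ge i 20 with hi | hi
  · have hil : i < pvGrid0.length := by rw [pvGrid0_length]; exact hi
    rw [List.getD_eq_getElem _ _ hil]
    have hrow : pvGrid0[i] = (List.range 10).map (fun _ => ((0:Int), (0:Int), (0:Int))) := by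
      simp only [pvGrid0, List.getElem_map]
    rw [hrow]
    rcases Nat.lt_or_ge j 10 with hj | hj
    · rw [List.getD_eq_getElem _ _ (by simp only [List.length_map, List.length_range]; exact hj)]
      simp only [List.getElem_map]
    · rw [List.getD_eq_default _ _ (by simp only [List.length_map, List.length_range]; exact hj)]
  · have houter : pvGrid0.getD i [] = [] :=
      List.getD_eq_default _ _ (by rw [pvGrid0_length]; omega)
    rw [houter]
    simp only [List.getD_nil]

lemma pvShape_modset (s : List (List (Int × Int × Int))) (hs : pvShape s) (i j : Nat)
    (c : Int × Int × Int) : pvShape (s.modify i (fun row => row.set j c)) := by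
  refine ⟨by simpa [List.length_modify] using hs.1, ?_⟩
  intro k h
  rw [List.getElem_modify]
  split_ifs with h'
  · simpa using hs.2 k (by simpa [List.length_modify] using h)
  · exact hs.2 k (by simpa [List.length_modify] using h)

lemma pvShape_foldl {α : Type} (f : List (List (Int × Int × Int)) → α → List (List (Int × Int × Int)))
    (hf : ∀ s x, pvShape s → pvShape (f s x)) :
    ∀ (l : List α) (s), pvShape s → pvShape (l.foldl f s) := by
  intro l
  induction l with
  | nil => intro s hs; exact hs
  | cons a l ih => intro s hs; exact ih _ (hf s a hs)

lemma pvCell_modset (s : List (List (Int × Int × Int))) (hs : pvShape s) (i j : Nat)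
    (hi : i < 20) (hj : j < 10) (c : Int × Int × Int) (i' j' : Nat) :
    pvCell (s.modify i (fun row => row.set j c)) i' j'
      = if i' = i ∧ j' = j then c else pvCell s i' j' := by
  have hil : i < s.length := by have := hs.1; omega
  have hrl : (s.getD i []).length = 10 := by
    rw [List.getD_eq_getElem _ _ hil]; exact hs.2 i hil
  unfold pvCell
  by_cases h1 : i' = i
  · subst h1
    have hmod : (s.modify i' (fun row => row.set j c)).getD i' [] = (s.getD i' []).set j c := by
      rw [List.getD_eq_getElem _ _ (by simpa [List.length_modify] using hil),
          List.getD_eq_getElem _ _ hil, List.getElem_modify]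
      simp
    rw [hmod]
    by_cases h2 : j' = j
    · subst h2
      rw [List.getD_eq_getElem _ _ (by rw [List.length_set, hrl]; exact hj),
          List.getElem_set]
      simp
    · have hne : j ≠ j' := fun h => h2 h.symm
      rw [List.getD_eq_getElem?_getD (l := (s.getD i' []).set j c),
          List.getD_eq_getElem?_getD (l := s.getD i' []), List.getElem?_set]
      simp [hne, h2]
  · have hmod : (s.modify i (fun row => row.set j c)).getD i' [] = s.getD i' [] := by
      have hne : i ≠ i' := fun h => h1 h.symm
      rw [List.getD_eq_getElem?_getD (l := s.modify i (fun row => row.set j c)),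
          List.getD_eq_getElem?_getD (l := s), List.getElem?_modify]
      rcases hx : s[i']? with _ | r <;> simp [hne]
    rw [hmod]
    simp [h1]

lemma pv_eq_target (zd : PySem.Dict (Int × Int) (Int × Int × Int))
    (s : List (List (Int × Int × Int))) (hs : pvShape s)
    (hc : ∀ i j, i < 20 → j < 10 → pvCell s i j = zd.getD ((i : Int), (j : Int)) (0, 0, 0)) :
    s = pvTarget zd := by
  apply List.ext_getElem
  · rw [hs.1]; simp only [pvTarget, List.length_map, List.length_range]
  · intro i h1 h2
    have hi : i < 20 := by have := hs.1; omega
    have ht : (pvTarget zd)[i]'h2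
        = (List.range 10).map (fun (j : Nat) => zd.getD ((i : Int), (j : Int)) (0, 0, 0)) := by
      simp only [pvTarget, List.getElem_map, List.getElem_range]
    rw [ht]
    apply List.ext_getElem
    · rw [hs.2 i h1]; simp only [List.length_map, List.length_range]
    · intro j hj1 hj2
      have hj : j < 10 := by have := hs.2 i h1; omega
      have hcell := hc i j hi hj
      unfold pvCell at hcell
      rw [List.getD_eq_getElem _ _ h1, List.getD_eq_getElem _ _ hj1] at hcell
      simp only [List.getElem_map, List.getElem_range]
      exact hcell

lemma pvCellB :
    ∀ (l : List ((Int × Int) × (Int × Int × Int))) (s : List (List (Int × Int × Int))),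
      pvShape s → (l.map Prod.fst).Nodup → ∀ (i j : Nat), i < 20 → j < 10 →
    pvCell (l.foldl (fun s p =>
        if 0 ≤ p.1.1 ∧ p.1.1 < 20 ∧ 0 ≤ p.1.2 ∧ p.1.2 < 10 then
          s.modify p.1.1.toNat (fun row => row.set p.1.2.toNat p.2)
        else s) s) i j
      = match l.find? (fun p => p.1 == ((i : Int), (j : Int))) with
        | some p => p.2
        | none => pvCell s i j := by
  intro l
  induction l with
  | nil => intro s hs hnd i j hi hj; simp only [List.foldl_nil, List.find?_nil]
  | cons p l ih =>
    intro s hs hnd i j hi hj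
    have hndt : (l.map Prod.fst).Nodup := (List.nodup_cons.mp (by simpa using hnd)).2
    simp only [List.foldl_cons]
    by_cases hp : p.1 = ((i : Int), (j : Int))
    · rw [List.find?_cons_of_pos (by simp [hp])]
      have hg : 0 ≤ p.1.1 ∧ p.1.1 < 20 ∧ 0 ≤ p.1.2 ∧ p.1.2 < 10 := by
        rw [hp]; dsimp only; omega
      rw [if_pos hg]
      have h1 : p.1.1.toNat = i := by rw [hp]; dsimp only; omega
      have h2 : p.1.2.toNat = j := by rw [hp]; dsimp only; omega
      rw [ih _ (pvShape_modset s hs _ _ _) hndt i j hi hj]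
      have hnone : l.find? (fun q => q.1 == ((i : Int), (j : Int))) = none := by
        rw [List.find?_eq_none]
        intro q hq hqk
        have hpnot : p.1 ∉ l.map Prod.fst := (List.nodup_cons.mp (by simpa using hnd)).1
        exact hpnot (by
          rw [hp, ← (by simpa using hqk : q.1 = ((i : Int), (j : Int)))]
          exact List.mem_map_of_mem hq)
      rw [hnone, h1, h2, pvCell_modset s hs i j hi hj]
      simp
    · rw [List.find?_cons_of_neg (by simp [hp])]
      by_cases hg : 0 ≤ p.1.1 ∧ p.1.1 < 20 ∧ 0 ≤ p.1.2 ∧ p.1.2 < 10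
      · rw [if_pos hg]
        rw [ih _ (pvShape_modset s hs _ _ _) hndt i j hi hj]
        rcases hE : l.find? (fun q => q.1 == ((i : Int), (j : Int))) with _ | q
        all_goals simp only [hE]
        · have hiN : p.1.1.toNat < 20 := by omega
          have hjN : p.1.2.toNat < 10 := by omega
          rw [pvCell_modset s hs _ _ hiN hjN]
          rw [if_neg]
          rintro ⟨e1, e2⟩
          apply hp
          have ha : p.1.1 = (i : Int) := by omega
          have hb : p.1.2 = (j : Int) := by omega
          calc p.1 = (p.1.1, p.1.2) := rfl
            _ = ((i : Int), (j : Int)) := by rw [ha, hb]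
      · rw [if_neg hg]
        rw [ih s hs hndt i j hi hj]

lemma pvCellInner (zd : PySem.Dict (Int × Int) (Int × Int × Int)) (i₀ : Nat) (hi₀ : i₀ < 20) :
    ∀ (L : List Nat) (s : List (List (Int × Int × Int))),
      pvShape s → (∀ x ∈ L, x < 10) → ∀ (i j : Nat), i < 20 → j < 10 →
    pvCell (L.foldl (fun s (j' : Nat) =>
        if zd.contains ((i₀ : Int), (j' : Int)) then
          s.modify i₀ (fun row => row.set j' (zd.getD ((i₀ : Int), (j' : Int)) (0, 0, 0)))
        else s) s) i j
      = if i = i₀ ∧ j ∈ L ∧ zd.contains ((i : Int), (j : Int)) = true then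
          zd.getD ((i : Int), (j : Int)) (0, 0, 0)
        else pvCell s i j := by
  intro L
  induction L with
  | nil => intro s hs hL i j hi hj; simp
  | cons a L ih =>
    intro s hs hL i j hi hj
    have ha10 : a < 10 := hL a List.mem_cons_self
    have hLt : ∀ x ∈ L, x < 10 := fun x hx => hL x (List.mem_cons_of_mem _ hx)
    simp only [List.foldl_cons]
    by_cases hca : zd.contains ((i₀ : Int), (a : Int)) = true
    · rw [if_pos hca]
      rw [ih _ (pvShape_modset s hs _ _ _) hLt i j hi hj]
      rw [pvCell_modset s hs i₀ a hi₀ ha10]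
      by_cases h1 : i = i₀
      · subst h1
        by_cases h2 : j = a
        · subst h2
          simp [List.mem_cons, hca]
        · simp [List.mem_cons, h2]
      · simp [h1]
    · rw [if_neg hca]
      rw [ih s hs hLt i j hi hj]
      by_cases h1 : i = i₀
      · subst h1
        by_cases h2 : j = a
        · subst h2
          simp [List.mem_cons, hca]
        · simp [List.mem_cons, h2]
      · simp [h1]

lemma pvCellOuter (zd : PySem.Dict (Int × Int) (Int × Int × Int)) :
    ∀ (L : List Nat) (s : List (List (Int × Int × Int))),
      pvShape s → (∀ x ∈ L, x < 20) → ∀ (i j : Nat), i < 20 → j < 10 →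
    pvCell (L.foldl (fun s (i₀ : Nat) =>
        (List.range ((s.getD i₀ []).length)).foldl (fun s (j' : Nat) =>
          if zd.contains ((i₀ : Int), (j' : Int)) then
            s.modify i₀ (fun row => row.set j' (zd.getD ((i₀ : Int), (j' : Int)) (0, 0, 0)))
          else s) s) s) i j
      = if i ∈ L ∧ zd.contains ((i : Int), (j : Int)) = true then
          zd.getD ((i : Int), (j : Int)) (0, 0, 0)
        else pvCell s i j := by
  intro L
  induction L with
  | nil => intro s hs hL i j hi hj; simp
  | cons i₀ L ih =>
    intro s hs hL i j hi hj
    have hi₀ : i₀ < 20 := hL _ List.mem_cons_self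
    have hLt : ∀ x ∈ L, x < 20 := fun x hx => hL x (List.mem_cons_of_mem _ hx)
    simp only [List.foldl_cons]
    have hrl : (s.getD i₀ []).length = 10 := by
      rw [List.getD_eq_getElem _ _ (by have := hs.1; omega)]
      exact hs.2 i₀ (by have := hs.1; omega)
    rw [hrl]
    have hs₁ : pvShape ((List.range 10).foldl (fun s (j' : Nat) =>
        if zd.contains ((i₀ : Int), (j' : Int)) then
          s.modify i₀ (fun row => row.set j' (zd.getD ((i₀ : Int), (j' : Int)) (0, 0, 0)))
        else s) s) := by
      apply pvShape_foldl
      · intro s x hsx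
        split_ifs
        · exact pvShape_modset s hsx _ _ _
        · exact hsx
      · exact hs
    rw [ih _ hs₁ hLt i j hi hj]
    rw [pvCellInner zd i₀ hi₀ (List.range 10) s hs (fun x hx => List.mem_range.mp hx) i j hi hj]
    by_cases h1 : i ∈ L <;> by_cases h2 : i = i₀ <;>
      by_cases hC : zd.contains ((i : Int), (j : Int)) = true <;>
      simp [List.mem_cons, List.mem_range, h1, h2, hC, hj] <;>
      (intro _ hT hF; simp [hT] at hF)

lemma pvA_target (zs : List (Int × Int × Int × Int × Int)) :
    tworzenie_siatki zs = pvTarget (pvDict zs) := by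
  unfold tworzenie_siatki
  show (List.range pvGrid0.length).foldl (fun s (i : Nat) =>
      (List.range ((s.getD i []).length)).foldl (fun s (j : Nat) =>
        if (pvDict zs).contains ((i : Int), (j : Int)) then
          s.modify i (fun row => row.set j ((pvDict zs).getD ((i : Int), (j : Int)) (0, 0, 0)))
        else s) s) pvGrid0 = pvTarget (pvDict zs)
  rw [pvGrid0_length]
  apply pv_eq_target
  · apply pvShape_foldl
    · intro s i₀ hsx
      apply pvShape_foldl
      · intro s x hsy
        split_ifs
        · exact pvShape_modset s hsy _ _ _
        · exact hsy
      · exact hsx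
    · exact pvShape_pvGrid0
  · intro i j hi hj
    rw [pvCellOuter (pvDict zs) (List.range 20) pvGrid0 pvShape_pvGrid0
      (fun x hx => List.mem_range.mp hx) i j hi hj]
    rw [pvCell_pvGrid0]
    by_cases hC : (pvDict zs).contains ((i : Int), (j : Int)) = true
    · rw [if_pos ⟨List.mem_range.mpr hi, hC⟩]
    · rw [if_neg (fun h => hC h.2)]
      rw [PySem.Dict.getD_of_not_contains _ _ (by simpa using hC)]

lemma pvB_target (zs : List (Int × Int × Int × Int × Int)) :
    tworzenie_siatki_alt zs = pvTarget (pvDict zs) := by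
  unfold tworzenie_siatki_alt
  have hnd : ((pvDict zs).items.map Prod.fst).Nodup := by
    have h := PySem.Dict.nodup_keys_ofList
      (zs.map (fun t => ((t.1, t.2.1), t.2.2)))
    simpa only [PySem.Dict.keys, pvDict] using h
  apply pv_eq_target
  · apply pvShape_foldl
    · intro s p hsx
      split_ifs
      · exact pvShape_modset s hsx _ _ _
      · exact hsx
    · exact pvShape_pvGrid0
  · intro i j hi hj
    rw [pvCellB (pvDict zs).items pvGrid0 pvShape_pvGrid0 hnd i j hi hj]
    rcases hE : (pvDict zs).items.find? (fun q => q.1 == ((i : Int), (j : Int))) with _ | q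
    all_goals simp only [hE]
    · rw [pvCell_pvGrid0]
      have hnc : (pvDict zs).contains ((i : Int), (j : Int)) = false := by
        rw [PySem.Dict.contains_eq_decide_mem_keys]
        simp only [decide_eq_false_iff_not]
        intro hmem
        have : ∃ q ∈ (pvDict zs).items, q.1 = ((i : Int), (j : Int)) := by
          simpa only [PySem.Dict.keys, List.mem_map] using hmem
        rcases this with ⟨q, hq, hqk⟩
        have := (List.find?_eq_none.mp hE) q hq
        simp [hqk] at this
      rw [PySem.Dict.getD_of_not_contains _ _ hnc]
    · have hkey : q.1 = ((i : Int), (j : Int)) := by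
        have := List.find?_some hE
        simpa using this
      have hmem : (((i : Int), (j : Int)), q.2) ∈ (pvDict zs).items := by
        rw [← hkey]
        exact List.mem_of_find?_eq_some hE
      have := PySem.Dict.getD_of_mem_items (pvDict zs) hmem
        (by simpa only [PySem.Dict.keys, pvDict] using hnd) ((0, 0, 0))
      exact this.symm

-- ===== VERDICT (by name: the statement is the Claim_ definition above) =====
theorem tworzenie_siatki_spec : Claim_equal_tworzenie_siatki := by
  intro zs _
  unfold Spec_tworzenie_siatki
  rw [pvA_target, pvB_target]
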